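-- pv_equiv track=rewrite | github.com/josiahadrineda/Daily-Coding-Problems | 068_AttackBishops.py | dfs
-- ===== SOURCE A (Python) =====
-- def dfs(r, c, dir, bo, M, res):
--     if r < 0 or r >= M or c < 0 or c >= M:
--         return 0
--     elif bo[r][c] == 1:
--         return 1
--     else:
--         if dir == 0:
--             res = dfs(r+1, c-1, 0, bo, M, res)
--         else:
--             res = dfs(r+1, c+1, 1, bo, M, res)
--         return res
-- ===== SOURCE B (Python) =====
-- def dfs(r, c, dir, bo, M, res):
--     dc = -1 if dir == 0 else 1
--     while 0 <= r < M and 0 <= c < M: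
--         if bo[r][c] == 1:
--             return 1
--         r += 1
--         c += dc
--     return 0
-- ===== Notes on version B (the rewrite author's own statement) =====
-- stated objective: simpler
-- what changed: The recursive diagonal walk is rewritten as an iterative while-loop with a precomputed column step dc, dropping the unused res accumulator.
-- outside the precondition, e.g. on dfs(0, 0, 1, [[1]], 2, 0): A returns 1, B returns 1
import Mathlib
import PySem

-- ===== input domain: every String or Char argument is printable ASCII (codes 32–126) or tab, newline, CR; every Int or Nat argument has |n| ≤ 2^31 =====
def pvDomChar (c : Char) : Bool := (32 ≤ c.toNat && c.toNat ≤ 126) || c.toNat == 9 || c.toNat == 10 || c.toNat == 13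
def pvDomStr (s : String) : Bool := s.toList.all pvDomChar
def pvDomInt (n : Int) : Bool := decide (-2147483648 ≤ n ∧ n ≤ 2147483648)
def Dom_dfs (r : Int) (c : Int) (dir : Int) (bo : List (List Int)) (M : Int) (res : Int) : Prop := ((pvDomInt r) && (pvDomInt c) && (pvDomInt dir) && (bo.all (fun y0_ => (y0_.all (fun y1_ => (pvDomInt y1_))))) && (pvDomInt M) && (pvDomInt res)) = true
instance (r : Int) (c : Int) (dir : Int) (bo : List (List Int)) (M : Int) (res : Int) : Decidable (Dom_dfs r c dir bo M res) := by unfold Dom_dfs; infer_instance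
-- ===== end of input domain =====

-- B replaces A's recursive diagonal walk by an iterative loop with a precomputed column step (objective: simpler).

-- ===== PORT A =====
-- Literal port of A's recursion; bo[r][c] is read with pyGetD (Pre_dfs excludes the inputs
-- where Python's bo[r][c] would raise IndexError, so the default is never relied upon).
def dfs (r : Int) (c : Int) (dir : Int) (bo : List (List Int)) (M : Int) (res : Int) : Int :=
  if r < 0 ∨ r ≥ M ∨ c < 0 ∨ c ≥ M then 0
  else if PySem.List.pyGetD (PySem.List.pyGetD bo r []) c 0 = 1 then 1
  else if dir = 0 then dfs (r + 1) (c - 1) 0 bo M res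
  else dfs (r + 1) (c + 1) 1 bo M res
termination_by (M - r).toNat
decreasing_by all_goals (simp at *; omega)

-- ===== PORT B =====
-- The while-loop of Source B: state (r, c) with constant step dc.
def dfsAltLoop (r : Int) (c : Int) (dc : Int) (bo : List (List Int)) (M : Int) : Int :=
  if 0 ≤ r ∧ r < M ∧ 0 ≤ c ∧ c < M then
    if PySem.List.pyGetD (PySem.List.pyGetD bo r []) c 0 = 1 then 1
    else dfsAltLoop (r + 1) (c + dc) dc bo M
  else 0
termination_by (M - r).toNat
decreasing_by simp at *; omega

def dfs_alt (r : Int) (c : Int) (dir : Int) (bo : List (List Int)) (M : Int) (res : Int) : Int :=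
  dfsAltLoop r c (if dir = 0 then -1 else 1) bo M

-- ===== PRECONDITION & SPEC =====
-- Pre_dfs excludes grids that are not at least M×M (unless the start is already out of bounds),
-- on which A's bo[r][c] indexing can raise IndexError along the walk; it is slightly conservative:
-- on some ragged grids A still returns (the walk hits a bishop or the edge first) — see claim cites.
def Pre_dfs (r : Int) (c : Int) (dir : Int) (bo : List (List Int)) (M : Int) (res : Int) : Prop :=
  (r < 0 ∨ M ≤ r ∨ c < 0 ∨ M ≤ c) ∨
  (M ≤ (bo.length : Int) ∧ ∀ row ∈ bo, M ≤ (row.length : Int))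
instance (r : Int) (c : Int) (dir : Int) (bo : List (List Int)) (M : Int) (res : Int) : Decidable (Pre_dfs r c dir bo M res) := by unfold Pre_dfs; infer_instance

def pvWitness_dfs : Int × Int × Int × List (List Int) × Int × Int := (0, 0, 0, [[0, 0], [1, 0]], 2, 0)

def Spec_dfs (r : Int) (c : Int) (dir : Int) (bo : List (List Int)) (M : Int) (res : Int) (out : Int) : Prop := out = dfs_alt r c dir bo M res
instance (r : Int) (c : Int) (dir : Int) (bo : List (List Int)) (M : Int) (res : Int) (out : Int) : Decidable (Spec_dfs r c dir bo M res out) := by unfold Spec_dfs; infer_instance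

-- ===== CLAIM (what is proved, stated in full; the proofs are below) =====
def Claim_equal_dfs : Prop := ∀ (r : Int) (c : Int) (dir : Int) (bo : List (List Int)) (M : Int) (res : Int), Dom_dfs r c dir bo M res → Pre_dfs r c dir bo M res → Spec_dfs r c dir bo M res (dfs r c dir bo M res)

-- ===== LEMMAS AND PROOFS =====

-- A's recursion equals B's loop (for every dir), by induction on the remaining rows M - r.
theorem dfs_eq_loop (bo : List (List Int)) (M res : Int) :
    ∀ (k : ℕ) (r c dir : Int), (M - r).toNat ≤ k →
      dfs r c dir bo M res = dfsAltLoop r c (if dir = 0 then -1 else 1) bo M := by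
  intro k
  induction k with
  | zero =>
    intro r c dir h
    rw [dfs, dfsAltLoop]
    have hoob : r < 0 ∨ r ≥ M ∨ c < 0 ∨ c ≥ M := by omega
    have hnb : ¬(0 ≤ r ∧ r < M ∧ 0 ≤ c ∧ c < M) := by omega
    rw [if_pos hoob, if_neg hnb]
  | succ k ih =>
    intro r c dir h
    rw [dfs, dfsAltLoop]
    by_cases hob : r < 0 ∨ r ≥ M ∨ c < 0 ∨ c ≥ M
    · have hnb : ¬(0 ≤ r ∧ r < M ∧ 0 ≤ c ∧ c < M) := by omega
      rw [if_pos hob, if_neg hnb]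
    · have hbnd : 0 ≤ r ∧ r < M ∧ 0 ≤ c ∧ c < M := by omega
      rw [if_neg hob, if_pos hbnd]
      by_cases hb : PySem.List.pyGetD (PySem.List.pyGetD bo r []) c 0 = 1
      · rw [if_pos hb, if_pos hb]
      · rw [if_neg hb, if_neg hb]
        by_cases hd : dir = 0
        · rw [if_pos hd, if_pos hd]
          have := ih (r + 1) (c - 1) 0 (by omega)
          simpa using this
        · rw [if_neg hd, if_neg hd]
          have := ih (r + 1) (c + 1) 1 (by omega)
          simpa using this

-- ===== VERDICT (by name: the statement is the Claim_ definition above) =====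
theorem dfs_spec : Claim_equal_dfs := by
  intro r c dir bo M res _ _
  unfold Spec_dfs dfs_alt
  exact dfs_eq_loop bo M res (M - r).toNat r c dir le_rfl
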